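-- pv_equiv track=rewrite | github.com/laduona/Fear-project | movement_record.py | hope_fear_calculate
-- ===== SOURCE A (Python) =====
-- def hope_fear_calculate(emo_dict):
--     """Return hope and fear details {state: value}"""
--     hope_dic = {key: value for key, value in emo_dict.items() if value > 0}
--     if any(hope_dic):
--         maximum = max(hope_dic.values())
--         hope = {key: value for key, value in emo_dict.items() if value == maximum}
--     else:
--         hope = {}
--
--     fear_dic = {key: value for key, value in emo_dict.items() if value < 0}
--     if any(fear_dic):
--         minimum = min(fear_dic.values())
--         fear = {key: value for key, value in emo_dict.items() if value == minimum}
--     else: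
--         fear = {}
--     return hope,fear
-- ===== SOURCE B (Python) =====
-- def hope_fear_calculate(emo_dict):
--     """Return hope and fear details {state: value}"""
--     hope, fear = {}, {}
--     max_pos, min_neg = None, None
--     for key, value in emo_dict.items():
--         if value > 0:
--             if max_pos is None or value > max_pos:
--                 max_pos, hope = value, {key: value}
--             elif value == max_pos:
--                 hope[key] = value
--         elif value < 0:
--             if min_neg is None or value < min_neg:
--                 min_neg, fear = value, {key: value}
--             elif value == min_neg:
--                 fear[key] = value
--     return hope, fear
-- ===== Notes on version B (the rewrite author's own statement) =====
-- stated objective: simpler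
-- what changed: Replaces A's four comprehension passes plus separate max/min computations with one running-extremum scan over the items that builds hope/fear incrementally (reset on a strictly better value, append on a tie), and drops A's any(dict) key-truthiness test in favour of plain emptiness.
-- intended difference: On dicts whose positive (resp. negative) entries all have the falsy key '' A's any(hope_dic)/any(fear_dic) tests key truthiness instead of emptiness and returns {} for that side although an extremal entry exists; B returns the extremal entry, which is the intended result. — e.g. on hope_fear_calculate([("", 3)]): A returns ([], []), B returns ([("", 3)], [])
import Mathlib
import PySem

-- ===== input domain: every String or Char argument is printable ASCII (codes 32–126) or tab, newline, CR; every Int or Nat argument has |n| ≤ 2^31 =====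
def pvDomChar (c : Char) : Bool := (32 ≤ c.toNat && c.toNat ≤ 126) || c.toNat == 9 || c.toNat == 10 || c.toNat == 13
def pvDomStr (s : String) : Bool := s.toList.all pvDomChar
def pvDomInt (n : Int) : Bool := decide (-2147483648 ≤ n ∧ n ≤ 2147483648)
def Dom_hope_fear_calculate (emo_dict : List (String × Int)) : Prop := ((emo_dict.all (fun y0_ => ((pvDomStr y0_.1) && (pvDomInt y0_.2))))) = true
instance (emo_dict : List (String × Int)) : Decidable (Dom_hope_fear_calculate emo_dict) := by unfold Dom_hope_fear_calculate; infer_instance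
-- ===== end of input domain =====

-- B replaces A's four comprehension passes + max/min with one running-extremum scan
-- (simpler); on dicts whose positive/negative keys are all the falsy '' the sides
-- differ as stated in D_ below.

-- ===== PORT A =====
-- dict comprehensions are transliterated as the loop of inserts they denote
def hope_fear_calculate (emo_dict : List (String × Int)) : (List (String × Int)) × (List (String × Int)) :=
  let hope_dic : PySem.Dict String Int :=
    (emo_dict.filter (fun kv => decide (0 < kv.2))).foldl (fun d kv => d.insert kv.1 kv.2) PySem.Dict.empty
  let hope : PySem.Dict String Int :=
    if (PySem.Dict.keys hope_dic).any (fun k => k != "") then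
      match PySem.List.max? (PySem.Dict.values hope_dic) (fun v => v) with
      | some maximum =>
        emo_dict.filter (fun kv => kv.2 == maximum) |>.foldl (fun d kv => d.insert kv.1 kv.2) PySem.Dict.empty
      | none => PySem.Dict.empty   -- unreachable: the guard implies hope_dic is nonempty
    else PySem.Dict.empty
  let fear_dic : PySem.Dict String Int :=
    (emo_dict.filter (fun kv => decide (kv.2 < 0))).foldl (fun d kv => d.insert kv.1 kv.2) PySem.Dict.empty
  let fear : PySem.Dict String Int :=
    if (PySem.Dict.keys fear_dic).any (fun k => k != "") then
      match PySem.List.min? (PySem.Dict.values fear_dic) (fun v => v) with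
      | some minimum =>
        emo_dict.filter (fun kv => kv.2 == minimum) |>.foldl (fun d kv => d.insert kv.1 kv.2) PySem.Dict.empty
      | none => PySem.Dict.empty
    else PySem.Dict.empty
  (hope.items, fear.items)

-- ===== PORT B =====
def hfcStep (st : PySem.Dict String Int × PySem.Dict String Int × Option Int × Option Int)
    (kv : String × Int) : PySem.Dict String Int × PySem.Dict String Int × Option Int × Option Int :=
  let hope := st.1; let fear := st.2.1; let maxPos := st.2.2.1; let minNeg := st.2.2.2
  if 0 < kv.2 then
    match maxPos with
    | none => (PySem.Dict.insert PySem.Dict.empty kv.1 kv.2, fear, some kv.2, minNeg)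
    | some m =>
      if m < kv.2 then (PySem.Dict.insert PySem.Dict.empty kv.1 kv.2, fear, some kv.2, minNeg)
      else if kv.2 == m then (hope.insert kv.1 kv.2, fear, maxPos, minNeg)
      else st
  else if kv.2 < 0 then
    match minNeg with
    | none => (hope, PySem.Dict.insert PySem.Dict.empty kv.1 kv.2, maxPos, some kv.2)
    | some m =>
      if kv.2 < m then (hope, PySem.Dict.insert PySem.Dict.empty kv.1 kv.2, maxPos, some kv.2)
      else if kv.2 == m then (hope, fear.insert kv.1 kv.2, maxPos, minNeg)
      else st
  else st

def hope_fear_calculate_alt (emo_dict : List (String × Int)) : (List (String × Int)) × (List (String × Int)) :=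
  let st := emo_dict.foldl hfcStep (PySem.Dict.empty, PySem.Dict.empty, none, none)
  (st.1.items, st.2.1.items)

-- ===== PRECONDITION & SPEC =====
-- The argument renders a Python dict, whose keys are necessarily distinct; an
-- association list with a repeated key corresponds to no dict input of A, so
-- Pre_ requires distinct keys (it excludes no input the Python A accepts).
def Pre_hope_fear_calculate (emo_dict : List (String × Int)) : Prop :=
  (emo_dict.map Prod.fst).Nodup
instance (emo_dict : List (String × Int)) : Decidable (Pre_hope_fear_calculate emo_dict) := by
  unfold Pre_hope_fear_calculate; infer_instance
def pvWitness_hope_fear_calculate : (List (String × Int)) := [("joy", 2), ("dread", -2)]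

-- On dicts that have a positive (resp. negative) entry but all positive (resp. negative)
-- entries carry the falsy key '', A's any(hope_dic)/any(fear_dic) tests key truthiness
-- instead of emptiness and returns {} for that side; B returns the extremal entry,
-- which is the intended result.
def D_hope_fear_calculate (emo_dict : List (String × Int)) : Prop :=
  ((∃ p ∈ emo_dict, 0 < p.2) ∧ ∀ p ∈ emo_dict, 0 < p.2 → p.1 = "") ∨
  ((∃ p ∈ emo_dict, p.2 < 0) ∧ ∀ p ∈ emo_dict, p.2 < 0 → p.1 = "")
instance (emo_dict : List (String × Int)) : Decidable (D_hope_fear_calculate emo_dict) := by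
  unfold D_hope_fear_calculate; infer_instance

def Spec_hope_fear_calculate (emo_dict : List (String × Int)) (out : (List (String × Int)) × (List (String × Int))) : Prop :=
  ¬ D_hope_fear_calculate emo_dict → out = hope_fear_calculate_alt emo_dict
instance (emo_dict : List (String × Int)) (out : (List (String × Int)) × (List (String × Int))) : Decidable (Spec_hope_fear_calculate emo_dict out) := by
  unfold Spec_hope_fear_calculate; infer_instance

def pvDiffWitness_hope_fear_calculate : (List (String × Int)) := [("", 3)]
def pvDiffWitnessOut_hope_fear_calculate : ((List (String × Int)) × (List (String × Int))) × ((List (String × Int)) × (List (String × Int))) :=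
  (([], []), ([("", 3)], []))

-- ===== CLAIM (what is proved, stated in full; the proofs are below) =====
def Claim_unchanged_hope_fear_calculate : Prop := ∀ (emo_dict : List (String × Int)), Dom_hope_fear_calculate emo_dict → Pre_hope_fear_calculate emo_dict → Spec_hope_fear_calculate emo_dict (hope_fear_calculate emo_dict)
def Claim_changed_hope_fear_calculate : Prop := Dom_hope_fear_calculate (pvDiffWitness_hope_fear_calculate) ∧ Pre_hope_fear_calculate (pvDiffWitness_hope_fear_calculate) ∧ D_hope_fear_calculate (pvDiffWitness_hope_fear_calculate) ∧ hope_fear_calculate (pvDiffWitness_hope_fear_calculate) = pvDiffWitnessOut_hope_fear_calculate.1 ∧ hope_fear_calculate_alt (pvDiffWitness_hope_fear_calculate) = pvDiffWitnessOut_hope_fear_calculate.2 ∧ pvDiffWitnessOut_hope_fear_calculate.1 ≠ pvDiffWitnessOut_hope_fear_calculate.2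
def Claim_exact_hope_fear_calculate : Prop := ∀ (emo_dict : List (String × Int)), Dom_hope_fear_calculate emo_dict → Pre_hope_fear_calculate emo_dict → D_hope_fear_calculate emo_dict → hope_fear_calculate emo_dict ≠ hope_fear_calculate_alt emo_dict

-- ===== LEMMAS AND PROOFS =====

-- proof-side descriptions of the two extremal slices
def pvPos (l : List (String × Int)) : List (String × Int) := l.filter (fun kv => decide (0 < kv.2))
def pvNeg (l : List (String × Int)) : List (String × Int) := l.filter (fun kv => decide (kv.2 < 0))
def pvMp (l : List (String × Int)) : Option Int := PySem.List.max? ((pvPos l).map Prod.snd) (fun v => v)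
def pvMn (l : List (String × Int)) : Option Int := PySem.List.min? ((pvNeg l).map Prod.snd) (fun v => v)
def pvHopeL (l : List (String × Int)) : List (String × Int) :=
  match pvMp l with | none => [] | some m => l.filter (fun kv => kv.2 == m)
def pvFearL (l : List (String × Int)) : List (String × Int) :=
  match pvMn l with | none => [] | some m => l.filter (fun kv => kv.2 == m)

lemma maxId_eq_some_iff (xs : List Int) (m : Int) :
    PySem.List.max? xs (fun v => v) = some m ↔ m ∈ xs ∧ ∀ y ∈ xs, y ≤ m := by
  constructor
  · intro h; exact ⟨PySem.List.max?_mem h, fun y hy => PySem.List.max?_isMax h y hy⟩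
  · rintro ⟨h, hb⟩
    cases hq : PySem.List.max? xs (fun v => v) with
    | none => rw [PySem.List.max?_eq_none_iff] at hq; simp [hq] at h
    | some m' =>
      have hc : m ≤ m' := PySem.List.max?_isMax hq m h
      have ha := hb m' (PySem.List.max?_mem hq)
      congr 1; omega

lemma minId_eq_some_iff (xs : List Int) (m : Int) :
    PySem.List.min? xs (fun v => v) = some m ↔ m ∈ xs ∧ ∀ y ∈ xs, m ≤ y := by
  constructor
  · intro h; exact ⟨PySem.List.min?_mem h, fun y hy => PySem.List.min?_isMin h y hy⟩
  · rintro ⟨h, hb⟩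
    cases hq : PySem.List.min? xs (fun v => v) with
    | none => rw [PySem.List.min?_eq_none_iff] at hq; simp [hq] at h
    | some m' =>
      have hc : m' ≤ m := PySem.List.min?_isMin hq m h
      have ha := hb m' (PySem.List.min?_mem hq)
      congr 1; omega

lemma pvMp_eq_some_iff (l : List (String × Int)) (m : Int) :
    pvMp l = some m ↔ (∃ p ∈ l, 0 < p.2 ∧ p.2 = m) ∧ (∀ p ∈ l, 0 < p.2 → p.2 ≤ m) := by
  unfold pvMp pvPos
  rw [maxId_eq_some_iff]
  simp only [List.mem_map, List.mem_filter, decide_eq_true_eq]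
  constructor
  · rintro ⟨⟨p, ⟨hp, hpos⟩, hm⟩, hb⟩
    exact ⟨⟨p, hp, hpos, hm⟩, fun q hq hqpos => hb q.2 ⟨q, ⟨hq, hqpos⟩, rfl⟩⟩
  · rintro ⟨⟨p, hp, hpos, hm⟩, hb⟩
    exact ⟨⟨p, ⟨hp, hpos⟩, hm⟩, by rintro y ⟨q, ⟨hq, hqpos⟩, rfl⟩; exact hb q hq hqpos⟩

lemma pvMn_eq_some_iff (l : List (String × Int)) (m : Int) :
    pvMn l = some m ↔ (∃ p ∈ l, p.2 < 0 ∧ p.2 = m) ∧ (∀ p ∈ l, p.2 < 0 → m ≤ p.2) := by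
  unfold pvMn pvNeg
  rw [minId_eq_some_iff]
  simp only [List.mem_map, List.mem_filter, decide_eq_true_eq]
  constructor
  · rintro ⟨⟨p, ⟨hp, hneg⟩, hm⟩, hb⟩
    exact ⟨⟨p, hp, hneg, hm⟩, fun q hq hqneg => hb q.2 ⟨q, ⟨hq, hqneg⟩, rfl⟩⟩
  · rintro ⟨⟨p, hp, hneg, hm⟩, hb⟩
    exact ⟨⟨p, ⟨hp, hneg⟩, hm⟩, by rintro y ⟨q, ⟨hq, hqneg⟩, rfl⟩; exact hb q hq hqneg⟩

lemma pvMp_eq_none_iff (l : List (String × Int)) :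
    pvMp l = none ↔ ∀ p ∈ l, ¬ (0 < p.2) := by
  unfold pvMp pvPos
  rw [PySem.List.max?_eq_none_iff]
  simp [List.filter_eq_nil_iff]

lemma pvMn_eq_none_iff (l : List (String × Int)) :
    pvMn l = none ↔ ∀ p ∈ l, ¬ (p.2 < 0) := by
  unfold pvMn pvNeg
  rw [PySem.List.min?_eq_none_iff]
  simp [List.filter_eq_nil_iff]

lemma pvMp_pos {l : List (String × Int)} {m : Int} (h : pvMp l = some m) : 0 < m := by
  obtain ⟨⟨p, _, hpos, hm⟩, -⟩ := (pvMp_eq_some_iff l m).1 h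
  omega

lemma pvMn_neg {l : List (String × Int)} {m : Int} (h : pvMn l = some m) : m < 0 := by
  obtain ⟨⟨p, _, hneg, hm⟩, -⟩ := (pvMn_eq_some_iff l m).1 h
  omega

lemma contains_mk_false (L : List (String × Int)) (k : String) (hk : k ∉ L.map Prod.fst) :
    (PySem.Dict.mk L).contains k = false := by
  simp only [PySem.Dict.contains_mk, List.any_eq_false]
  intro p hp
  simp only [List.mem_map] at hk
  simp only [beq_iff_eq]
  exact fun e => hk ⟨p, hp, e⟩

lemma insert_mk_fresh (L : List (String × Int)) (k : String) (v : Int) (hk : k ∉ L.map Prod.fst) :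
    (PySem.Dict.mk L).insert k v = PySem.Dict.mk (L ++ [(k, v)]) := by
  apply PySem.Dict.ext
  exact PySem.Dict.items_insert_of_not_contains _ v (contains_mk_false L k hk)

lemma foldl_insert_mk (L : List (String × Int)) (hL : (L.map Prod.fst).Nodup) :
    L.foldl (fun d kv => d.insert kv.1 kv.2) PySem.Dict.empty = PySem.Dict.mk L := by
  apply PySem.Dict.ext
  have h := PySem.Dict.items_foldl_insert_fresh (l := L) (k := Prod.fst) (v := Prod.snd)
      (d := (PySem.Dict.empty : PySem.Dict String Int))
      (by intro a _; exact PySem.Dict.contains_empty _) hL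
  simpa using h

lemma nodup_filter_fst {l : List (String × Int)} (hk : (l.map Prod.fst).Nodup)
    (p : (String × Int) → Bool) : ((l.filter p).map Prod.fst).Nodup :=
  ((List.filter_sublist (l := l)).map Prod.fst).nodup hk

lemma pvPos_append_not (l : List (String × Int)) (x : String × Int) (hx : ¬ 0 < x.2) :
    pvPos (l ++ [x]) = pvPos l := by
  simp [pvPos, List.filter_append, hx]

lemma pvNeg_append_not (l : List (String × Int)) (x : String × Int) (hx : ¬ x.2 < 0) :
    pvNeg (l ++ [x]) = pvNeg l := by
  simp [pvNeg, List.filter_append, hx]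

lemma pvMp_append_not (l : List (String × Int)) (x : String × Int) (hx : ¬ 0 < x.2) :
    pvMp (l ++ [x]) = pvMp l := by
  unfold pvMp; rw [pvPos_append_not l x hx]

lemma pvMn_append_not (l : List (String × Int)) (x : String × Int) (hx : ¬ x.2 < 0) :
    pvMn (l ++ [x]) = pvMn l := by
  unfold pvMn; rw [pvNeg_append_not l x hx]

lemma pvHopeL_stable (l : List (String × Int)) (x : String × Int)
    (hmp : pvMp (l ++ [x]) = pvMp l) (h : ∀ m, pvMp l = some m → x.2 ≠ m) :
    pvHopeL (l ++ [x]) = pvHopeL l := by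
  unfold pvHopeL
  rw [hmp]
  cases hq : pvMp l with
  | none => rfl
  | some m => simp [List.filter_append, h m hq]

lemma pvFearL_stable (l : List (String × Int)) (x : String × Int)
    (hmn : pvMn (l ++ [x]) = pvMn l) (h : ∀ m, pvMn l = some m → x.2 ≠ m) :
    pvFearL (l ++ [x]) = pvFearL l := by
  unfold pvFearL
  rw [hmn]
  cases hq : pvMn l with
  | none => rfl
  | some m => simp [List.filter_append, h m hq]

-- the single-pass loop of B computes the extremal slices
lemma insert_empty_eq (k : String) (v : Int) :
    (PySem.Dict.empty : PySem.Dict String Int).insert k v = PySem.Dict.mk [(k, v)] := by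
  apply PySem.Dict.ext
  exact PySem.Dict.items_insert_of_not_contains _ v (PySem.Dict.contains_empty k)

lemma fold_hfc (l : List (String × Int)) (hk : (l.map Prod.fst).Nodup) :
    l.foldl hfcStep (PySem.Dict.empty, PySem.Dict.empty, none, none)
      = (PySem.Dict.mk (pvHopeL l), PySem.Dict.mk (pvFearL l), pvMp l, pvMn l) := by
  induction l using List.reverseRecOn with
  | nil => rfl
  | append_singleton l x ih =>
    rw [List.map_append] at hk
    have hk' : (l.map Prod.fst).Nodup := hk.of_append_left
    have hx1 : x.1 ∉ l.map Prod.fst := by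
      intro hmem
      exact (List.nodup_append.1 hk).2.2 x.1 hmem x.1 (by simp) rfl
    rw [List.foldl_append, ih hk', List.foldl_cons, List.foldl_nil]
    by_cases hx : 0 < x.2
    · -- positive entry: the fear side is unchanged
      have hxneg : ¬ x.2 < 0 := by omega
      have hmn' : pvMn (l ++ [x]) = pvMn l := pvMn_append_not l x hxneg
      have hfear : pvFearL (l ++ [x]) = pvFearL l := by
        refine pvFearL_stable l x hmn' (fun m hm => ?_)
        have := pvMn_neg hm; omega
      cases hmp : pvMp l with
      | none =>
        have hp0 := (pvMp_eq_none_iff l).1 hmp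
        have hmpx : pvMp (l ++ [x]) = some x.2 := by
          rw [pvMp_eq_some_iff]
          refine ⟨⟨x, by simp, hx, rfl⟩, ?_⟩
          intro p hp hppos
          rcases List.mem_append.1 hp with h | h
          · exact absurd hppos (hp0 p h)
          · simp at h; subst h; omega
        have hnil : l.filter (fun kv => kv.2 == x.2) = [] := by
          rw [List.filter_eq_nil_iff]
          intro p hp
          simp only [beq_iff_eq]
          exact fun e => (hp0 p hp) (e ▸ hx)
        have hhope : pvHopeL (l ++ [x]) = [x] := by
          unfold pvHopeL
          rw [hmpx]
          simp [List.filter_append, hnil]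
        rw [hmpx, hmn', hfear, hhope]
        simp [hfcStep, hx, insert_empty_eq]
      | some m =>
        have hiff := (pvMp_eq_some_iff l m).1 hmp
        by_cases hgt : m < x.2
        · have hmpx : pvMp (l ++ [x]) = some x.2 := by
            rw [pvMp_eq_some_iff]
            refine ⟨⟨x, by simp, hx, rfl⟩, ?_⟩
            intro p hp hppos
            rcases List.mem_append.1 hp with h | h
            · have := hiff.2 p h hppos; omega
            · simp at h; subst h; omega
          have hnil : l.filter (fun kv => kv.2 == x.2) = [] := by
            rw [List.filter_eq_nil_iff]
            intro p hp
            simp only [beq_iff_eq]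
            intro e
            have := hiff.2 p hp (e ▸ hx); omega
          have hhope : pvHopeL (l ++ [x]) = [x] := by
            unfold pvHopeL
            rw [hmpx]
            simp [List.filter_append, hnil]
          rw [hmpx, hmn', hfear, hhope]
          simp [hfcStep, hx, hgt, insert_empty_eq]
        · by_cases heq : x.2 = m
          · -- tie: the loop appends the entry to hope
            have hmpx : pvMp (l ++ [x]) = some m := by
              rw [pvMp_eq_some_iff]
              obtain ⟨⟨p, hp, hppos, hpm⟩, hb⟩ := hiff
              refine ⟨⟨p, List.mem_append_left _ hp, hppos, hpm⟩, ?_⟩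
              intro q hq hqpos
              rcases List.mem_append.1 hq with h | h
              · exact hb q h hqpos
              · simp at h; subst h; omega
            have hhope : pvHopeL (l ++ [x]) = pvHopeL l ++ [x] := by
              unfold pvHopeL
              rw [hmpx, hmp]
              simp [List.filter_append, heq]
            have hfresh : x.1 ∉ (pvHopeL l).map Prod.fst := by
              intro hmem
              apply hx1
              unfold pvHopeL at hmem
              rw [hmp] at hmem
              obtain ⟨p, hp, e⟩ := List.mem_map.1 hmem
              exact List.mem_map.2 ⟨p, (List.mem_filter.1 hp).1, e⟩
            have hxeq : (x.2 == m) = true := by simp [heq]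
            have hins := insert_mk_fresh (pvHopeL l) x.1 x.2 hfresh
            rw [hmpx, hmn', hfear, hhope]
            simp [hfcStep, hx, hgt, hxeq, hins]
          · -- a strictly smaller positive: the state is unchanged
            have hmpx : pvMp (l ++ [x]) = some m := by
              rw [pvMp_eq_some_iff]
              obtain ⟨⟨p, hp, hppos, hpm⟩, hb⟩ := hiff
              refine ⟨⟨p, List.mem_append_left _ hp, hppos, hpm⟩, ?_⟩
              intro q hq hqpos
              rcases List.mem_append.1 hq with h | h
              · exact hb q h hqpos
              · simp at h; subst h; omega
            have hhope : pvHopeL (l ++ [x]) = pvHopeL l := by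
              refine pvHopeL_stable l x (hmpx.trans hmp.symm) (fun m' hm' => ?_)
              rw [hmp] at hm'; injection hm' with e; omega
            rw [hmpx, hmn', hfear, hhope]
            simp [hfcStep, hx, hgt, heq]
    · by_cases hxn : x.2 < 0
      · -- negative entry: the hope side is unchanged
        have hmp' : pvMp (l ++ [x]) = pvMp l := pvMp_append_not l x hx
        have hhope : pvHopeL (l ++ [x]) = pvHopeL l := by
          refine pvHopeL_stable l x hmp' (fun m hm => ?_)
          have := pvMp_pos hm; omega
        cases hmn : pvMn l with
        | none =>
          have hn0 := (pvMn_eq_none_iff l).1 hmn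
          have hmnx : pvMn (l ++ [x]) = some x.2 := by
            rw [pvMn_eq_some_iff]
            refine ⟨⟨x, by simp, hxn, rfl⟩, ?_⟩
            intro p hp hpneg
            rcases List.mem_append.1 hp with h | h
            · exact absurd hpneg (hn0 p h)
            · simp at h; subst h; omega
          have hnil : l.filter (fun kv => kv.2 == x.2) = [] := by
            rw [List.filter_eq_nil_iff]
            intro p hp
            simp only [beq_iff_eq]
            exact fun e => (hn0 p hp) (e ▸ hxn)
          have hfear : pvFearL (l ++ [x]) = [x] := by
            unfold pvFearL
            rw [hmnx]
            simp [List.filter_append, hnil]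
          rw [hmp', hmnx, hhope, hfear]
          simp [hfcStep, hx, hxn, insert_empty_eq]
        | some m =>
          have hiff := (pvMn_eq_some_iff l m).1 hmn
          by_cases hlt : x.2 < m
          · have hmnx : pvMn (l ++ [x]) = some x.2 := by
              rw [pvMn_eq_some_iff]
              refine ⟨⟨x, by simp, hxn, rfl⟩, ?_⟩
              intro p hp hpneg
              rcases List.mem_append.1 hp with h | h
              · have := hiff.2 p h hpneg; omega
              · simp at h; subst h; omega
            have hnil : l.filter (fun kv => kv.2 == x.2) = [] := by
              rw [List.filter_eq_nil_iff]
              intro p hp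
              simp only [beq_iff_eq]
              intro e
              have := hiff.2 p hp (e ▸ hxn); omega
            have hfear : pvFearL (l ++ [x]) = [x] := by
              unfold pvFearL
              rw [hmnx]
              simp [List.filter_append, hnil]
            rw [hmp', hmnx, hhope, hfear]
            simp [hfcStep, hx, hxn, hlt, insert_empty_eq]
          · by_cases heq : x.2 = m
            · have hmnx : pvMn (l ++ [x]) = some m := by
                rw [pvMn_eq_some_iff]
                obtain ⟨⟨p, hp, hpneg, hpm⟩, hb⟩ := hiff
                refine ⟨⟨p, List.mem_append_left _ hp, hpneg, hpm⟩, ?_⟩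
                intro q hq hqneg
                rcases List.mem_append.1 hq with h | h
                · exact hb q h hqneg
                · simp at h; subst h; omega
              have hfear : pvFearL (l ++ [x]) = pvFearL l ++ [x] := by
                unfold pvFearL
                rw [hmnx, hmn]
                simp [List.filter_append, heq]
              have hfresh : x.1 ∉ (pvFearL l).map Prod.fst := by
                intro hmem
                apply hx1
                unfold pvFearL at hmem
                rw [hmn] at hmem
                obtain ⟨p, hp, e⟩ := List.mem_map.1 hmem
                exact List.mem_map.2 ⟨p, (List.mem_filter.1 hp).1, e⟩
              have hxeq : (x.2 == m) = true := by simp [heq]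
              have hins := insert_mk_fresh (pvFearL l) x.1 x.2 hfresh
              rw [hmp', hmnx, hhope, hfear]
              simp [hfcStep, hx, hxn, hlt, hxeq, hins]
            · have hmnx : pvMn (l ++ [x]) = some m := by
                rw [pvMn_eq_some_iff]
                obtain ⟨⟨p, hp, hpneg, hpm⟩, hb⟩ := hiff
                refine ⟨⟨p, List.mem_append_left _ hp, hpneg, hpm⟩, ?_⟩
                intro q hq hqneg
                rcases List.mem_append.1 hq with h | h
                · exact hb q h hqneg
                · simp at h; subst h; omega
              have hfear : pvFearL (l ++ [x]) = pvFearL l := by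
                refine pvFearL_stable l x (hmnx.trans hmn.symm) (fun m' hm' => ?_)
                rw [hmn] at hm'; injection hm' with e; omega
              rw [hmp', hmnx, hhope, hfear]
              simp [hfcStep, hx, hxn, hlt, heq]
      · -- zero entry: nothing changes
        have hmp' : pvMp (l ++ [x]) = pvMp l := pvMp_append_not l x hx
        have hmn' : pvMn (l ++ [x]) = pvMn l := pvMn_append_not l x hxn
        have hhope : pvHopeL (l ++ [x]) = pvHopeL l := by
          refine pvHopeL_stable l x hmp' (fun m hm => ?_)
          have := pvMp_pos hm; omega
        have hfear : pvFearL (l ++ [x]) = pvFearL l := by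
          refine pvFearL_stable l x hmn' (fun m hm => ?_)
          have := pvMn_neg hm; omega
        rw [hmp', hmn', hhope, hfear]
        simp [hfcStep, hx, hxn]

-- evaluating port A under distinct keys
lemma A_eval (l : List (String × Int)) (hpre : (l.map Prod.fst).Nodup) :
    hope_fear_calculate l =
      ((if ((pvPos l).map Prod.fst).any (fun k => k != "") = true then pvHopeL l else []),
       (if ((pvNeg l).map Prod.fst).any (fun k => k != "") = true then pvFearL l else [])) := by
  have h1 := foldl_insert_mk (l.filter (fun kv => decide (0 < kv.2))) (nodup_filter_fst hpre _)
  have h2 := foldl_insert_mk (l.filter (fun kv => decide (kv.2 < 0))) (nodup_filter_fst hpre _)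
  unfold hope_fear_calculate
  rw [h1, h2]
  simp only [PySem.Dict.keys_mk, PySem.Dict.values_mk]
  unfold pvPos pvNeg pvHopeL pvFearL pvMp pvMn pvPos pvNeg
  split_ifs with c1 c2 c2
  · cases hq : PySem.List.max? ((l.filter (fun kv => decide (0 < kv.2))).map Prod.snd) (fun v => v) with
    | none =>
      rw [PySem.List.max?_eq_none_iff, List.map_eq_nil_iff] at hq
      rw [hq] at c1
      simp at c1
    | some m =>
      cases hr : PySem.List.min? ((l.filter (fun kv => decide (kv.2 < 0))).map Prod.snd) (fun v => v) with
      | none =>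
        rw [PySem.List.min?_eq_none_iff, List.map_eq_nil_iff] at hr
        rw [hr] at c2
        simp at c2
      | some m' =>
        simp [foldl_insert_mk (l.filter (fun kv => kv.2 == m)) (nodup_filter_fst hpre _),
              foldl_insert_mk (l.filter (fun kv => kv.2 == m')) (nodup_filter_fst hpre _)]
  · cases hq : PySem.List.max? ((l.filter (fun kv => decide (0 < kv.2))).map Prod.snd) (fun v => v) with
    | none =>
      rw [PySem.List.max?_eq_none_iff, List.map_eq_nil_iff] at hq
      rw [hq] at c1
      simp at c1
    | some m =>
      simp [foldl_insert_mk (l.filter (fun kv => kv.2 == m)) (nodup_filter_fst hpre _)]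
      rfl
  · cases hr : PySem.List.min? ((l.filter (fun kv => decide (kv.2 < 0))).map Prod.snd) (fun v => v) with
    | none =>
      rw [PySem.List.min?_eq_none_iff, List.map_eq_nil_iff] at hr
      rw [hr] at c2
      simp at c2
    | some m' =>
      simp [foldl_insert_mk (l.filter (fun kv => kv.2 == m')) (nodup_filter_fst hpre _)]
      rfl
  · rfl

lemma alt_eval (l : List (String × Int)) (hpre : (l.map Prod.fst).Nodup) :
    hope_fear_calculate_alt l = (pvHopeL l, pvFearL l) := by
  unfold hope_fear_calculate_alt
  rw [fold_hfc l hpre]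

-- ===== VERDICT (by name: the statement is the Claim_ definition above) =====
theorem hope_fear_calculate_spec : Claim_unchanged_hope_fear_calculate := by
  intro l _ hpre
  unfold Spec_hope_fear_calculate
  intro hnd
  unfold Pre_hope_fear_calculate at hpre
  unfold D_hope_fear_calculate at hnd
  push Not at hnd
  rw [A_eval l hpre, alt_eval l hpre]
  refine Prod.ext ?_ ?_
  · show (if _ then _ else _) = pvHopeL l
    cases hq : pvMp l with
    | none =>
      have hp0 := (pvMp_eq_none_iff l).1 hq
      have hnil : pvPos l = [] := by
        unfold pvPos
        rw [List.filter_eq_nil_iff]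
        intro p hp
        simpa using hp0 p hp
      rw [hnil]
      unfold pvHopeL
      rw [hq]
      simp
    | some m =>
      obtain ⟨⟨p, hp, hppos, hpm⟩, -⟩ := (pvMp_eq_some_iff l m).1 hq
      obtain ⟨q, hq', hqpos, hqne⟩ := hnd.1 ⟨p, hp, hppos⟩
      have hany : ((pvPos l).map Prod.fst).any (fun k => k != "") = true := by
        simp only [List.any_eq_true, List.mem_map]
        refine ⟨q.1, ⟨q, ?_, rfl⟩, by simpa using hqne⟩
        unfold pvPos
        exact List.mem_filter.2 ⟨hq', by simpa using hqpos⟩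
      rw [if_pos hany]
  · show (if _ then _ else _) = pvFearL l
    cases hq : pvMn l with
    | none =>
      have hn0 := (pvMn_eq_none_iff l).1 hq
      have hnil : pvNeg l = [] := by
        unfold pvNeg
        rw [List.filter_eq_nil_iff]
        intro p hp
        simpa using hn0 p hp
      rw [hnil]
      unfold pvFearL
      rw [hq]
      simp
    | some m =>
      obtain ⟨⟨p, hp, hpneg, hpm⟩, -⟩ := (pvMn_eq_some_iff l m).1 hq
      obtain ⟨q, hq', hqneg, hqne⟩ := hnd.2 ⟨p, hp, hpneg⟩
      have hany : ((pvNeg l).map Prod.fst).any (fun k => k != "") = true := by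
        simp only [List.any_eq_true, List.mem_map]
        refine ⟨q.1, ⟨q, ?_, rfl⟩, by simpa using hqne⟩
        unfold pvNeg
        exact List.mem_filter.2 ⟨hq', by simpa using hqneg⟩
      rw [if_pos hany]
theorem hope_fear_calculate_changed : Claim_changed_hope_fear_calculate := by
  unfold Claim_changed_hope_fear_calculate; decide
theorem hope_fear_calculate_tight : Claim_exact_hope_fear_calculate := by
  intro l _ hpre hD heq
  unfold Pre_hope_fear_calculate at hpre
  unfold D_hope_fear_calculate at hD
  rw [A_eval l hpre, alt_eval l hpre] at heq
  rcases hD with ⟨hex, hall⟩ | ⟨hex, hall⟩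
  · obtain ⟨p, hp, hppos⟩ := hex
    have hany : ((pvPos l).map Prod.fst).any (fun k => k != "") = false := by
      simp only [List.any_eq_false, List.mem_map]
      rintro k ⟨q, hq, rfl⟩
      have hq' := List.mem_filter.1 hq
      simp [hall q hq'.1 (by simpa using hq'.2)]
    cases hq : pvMp l with
    | none =>
      have hp0 := (pvMp_eq_none_iff l).1 hq
      exact (hp0 p hp) hppos
    | some m =>
      obtain ⟨⟨r, hr, hrpos, hrm⟩, -⟩ := (pvMp_eq_some_iff l m).1 hq
      have hmem : r ∈ pvHopeL l := by
        unfold pvHopeL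
        rw [hq]
        exact List.mem_filter.2 ⟨hr, by simpa using hrm⟩
      have h1 := congrArg Prod.fst heq
      simp only [if_neg (by simp [hany] : ¬ ((pvPos l).map Prod.fst).any (fun k => k != "") = true)] at h1
      exact (List.ne_nil_of_mem hmem) h1.symm
  · obtain ⟨p, hp, hpneg⟩ := hex
    have hany : ((pvNeg l).map Prod.fst).any (fun k => k != "") = false := by
      simp only [List.any_eq_false, List.mem_map]
      rintro k ⟨q, hq, rfl⟩
      have hq' := List.mem_filter.1 hq
      simp [hall q hq'.1 (by simpa using hq'.2)]
    cases hq : pvMn l with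
    | none =>
      have hn0 := (pvMn_eq_none_iff l).1 hq
      exact (hn0 p hp) hpneg
    | some m =>
      obtain ⟨⟨r, hr, hrneg, hrm⟩, -⟩ := (pvMn_eq_some_iff l m).1 hq
      have hmem : r ∈ pvFearL l := by
        unfold pvFearL
        rw [hq]
        exact List.mem_filter.2 ⟨hr, by simpa using hrm⟩
      have h2 := congrArg Prod.snd heq
      simp only [if_neg (by simp [hany] : ¬ ((pvNeg l).map Prod.fst).any (fun k => k != "") = true)] at h2
      exact (List.ne_nil_of_mem hmem) h2.symm
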